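-- pv_equiv track=rewrite | github.com/7KASPAR7/University-Homeworks | sem1/hw4/task1/smile_logic.py | check
-- ===== SOURCE A (Python) =====
-- def check(string):
--     LST = ['(', ')', '{', '}', '[', ']']
--     k = True
--     for symbol in LST:
--         if symbol in string:
--             k = False
--             break
--     return k
-- ===== SOURCE B (Python) =====
-- def check(string):
--     return not any(ch in "(){}[]" for ch in string)
-- ===== Notes on version B (the rewrite author's own statement) =====
-- stated objective: idiomatic
-- what changed: Instead of looping over the six bracket strings and running a substring scan of the whole input for each, B makes a single short-circuiting pass over the input's characters testing each against the constant bracket string.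
import Mathlib
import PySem

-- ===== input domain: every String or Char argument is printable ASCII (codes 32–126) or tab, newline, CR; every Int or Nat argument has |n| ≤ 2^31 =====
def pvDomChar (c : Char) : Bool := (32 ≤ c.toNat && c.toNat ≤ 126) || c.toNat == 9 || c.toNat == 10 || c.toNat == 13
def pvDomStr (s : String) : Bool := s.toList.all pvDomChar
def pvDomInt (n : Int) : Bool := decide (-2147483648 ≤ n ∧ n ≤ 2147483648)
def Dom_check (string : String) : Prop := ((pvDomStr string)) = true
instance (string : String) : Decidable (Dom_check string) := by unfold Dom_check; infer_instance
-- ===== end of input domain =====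

-- B replaces A's six substring scans of the input by one short-circuiting pass over the input's characters.


-- ===== PORT A =====
-- the for-loop over LST with break: k starts True and becomes False at the first bracket found
def checkLoop (lst : List String) (string : String) : Bool :=
  match lst with
  | [] => true
  | symbol :: rest =>
      if PySem.Str.isIn symbol string then false else checkLoop rest string

def check (string : String) : Bool :=
  checkLoop ["(", ")", "{", "}", "[", "]"] string

-- ===== PORT B =====
-- Source B: return not any(ch in "(){}[]" for ch in string)
def check_alt (string : String) : Bool :=
  !(string.toList.any (fun ch => PySem.Str.isIn (String.ofList [ch]) "(){}[]"))

-- ===== PRECONDITION & SPEC =====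
def Spec_check (string : String) (out : Bool) : Prop := out = check_alt string
instance (string : String) (out : Bool) : Decidable (Spec_check string out) := by unfold Spec_check; infer_instance

-- ===== CLAIM (what is proved, stated in full; the proofs are below) =====
def Claim_equal_check : Prop := ∀ (string : String), Dom_check string → Spec_check string (check string)

-- ===== LEMMAS AND PROOFS =====

-- a one-character 'sub in s' is character membership
theorem isIn_single (c : Char) (l : List Char) :
    PySem.Chars.isIn [c] l = l.contains c := by
  by_cases h : c ∈ l
  · simp [(PySem.Chars.isIn_iff_infix [c] l).2 ((List.singleton_infix_iff c l).2 h), h]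
  · cases hb : PySem.Chars.isIn [c] l
    · simp [h]
    · exact absurd ((List.singleton_infix_iff c l).1 ((PySem.Chars.isIn_iff_infix [c] l).1 hb)) h

-- A's break-loop is 'no bracket string occurs in s'
theorem checkLoop_any (lst : List String) (s : String) :
    checkLoop lst s = !(lst.any fun b => PySem.Str.isIn b s) := by
  induction lst with
  | nil => rfl
  | cons b rest ih =>
      show (if PySem.Str.isIn b s then false else checkLoop rest s) = _
      simp only [List.any_cons]
      cases hb : PySem.Str.isIn b s <;> simp [ih]

theorem check_eq_forall (s : String) :
    check s = (decide (∀ c ∈ s.toList, ¬ c ∈ ['(', ')', '{', '}', '[', ']'])) := by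
  rw [check, checkLoop_any]
  by_cases h : ∀ c ∈ s.toList, ¬ c ∈ ['(', ')', '{', '}', '[', ']']
  · rw [decide_eq_true h, Bool.not_eq_true', List.any_eq_false]
    intro b hb
    fin_cases hb <;> simp [isIn_single] <;>
      first
        | exact fun hm => (h '(' hm) (by simp)
        | exact fun hm => (h ')' hm) (by simp)
        | exact fun hm => (h '{' hm) (by simp)
        | exact fun hm => (h '}' hm) (by simp)
        | exact fun hm => (h '[' hm) (by simp)
        | exact fun hm => (h ']' hm) (by simp)
  · rw [decide_eq_false h, Bool.not_eq_false', List.any_eq_true]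
    push_neg at h
    obtain ⟨c, hc, hm⟩ := h
    fin_cases hm
    · exact ⟨"(", by simp, by simp [isIn_single, hc]⟩
    · exact ⟨")", by simp, by simp [isIn_single, hc]⟩
    · exact ⟨"{", by simp, by simp [isIn_single, hc]⟩
    · exact ⟨"}", by simp, by simp [isIn_single, hc]⟩
    · exact ⟨"[", by simp, by simp [isIn_single, hc]⟩
    · exact ⟨"]", by simp, by simp [isIn_single, hc]⟩

theorem check_alt_eq_forall (s : String) :
    check_alt s = (decide (∀ c ∈ s.toList, ¬ c ∈ ['(', ')', '{', '}', '[', ']'])) := by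
  rw [check_alt]
  by_cases h : ∀ c ∈ s.toList, ¬ c ∈ ['(', ')', '{', '}', '[', ']']
  · rw [decide_eq_true h, Bool.not_eq_true', List.any_eq_false]
    intro c hc
    have := h c hc
    simp_all [isIn_single]
  · rw [decide_eq_false h, Bool.not_eq_false', List.any_eq_true]
    push_neg at h
    obtain ⟨c, hc, hm⟩ := h
    exact ⟨c, hc, by fin_cases hm <;> simp [isIn_single]⟩

-- ===== VERDICT (by name: the statement is the Claim_ definition above) =====
theorem check_spec : Claim_equal_check := by
  intro s _
  unfold Spec_check
  rw [check_eq_forall, check_alt_eq_forall]
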